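-- pv_equiv track=rewrite | github.com/lorenzo9598/flutterator | generators/helpers/utils.py | pascal_case_to_kebab_case
-- ===== SOURCE A (Python) =====
-- def pascal_case_to_kebab_case(pascal_str: str) -> str:
--     """
--     Convert PascalCase to kebab-case.
--
--     Examples:
--         TodoItem → todo-item
--         Note → note
--         HTTPRequest → http-request
--     """
--     if not pascal_str:
--         return pascal_str
--
--     # Insert hyphen before uppercase letters (except the first one)
--     result = pascal_str[0].lower()
--     for char in pascal_str[1:]:
--         if char.isupper():
--             result += '-' + char.lower()
--         else:
--             result += char
--
--     return result
-- ===== SOURCE B (Python) =====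
-- def pascal_case_to_kebab_case(pascal_str: str) -> str:
--     """Convert PascalCase to kebab-case by splitting into word segments
--     at uppercase letters, then joining with hyphens and lowercasing once."""
--     if not pascal_str:
--         return pascal_str
--     words = []
--     current = pascal_str[0]
--     for char in pascal_str[1:]:
--         if char.isupper():
--             words.append(current)
--             current = char
--         else:
--             current += char
--     words.append(current)
--     return '-'.join(words).lower()
-- ===== Notes on version B (the rewrite author's own statement) =====
-- stated objective: alternative
-- what changed: B splits the string into word segments at uppercase boundaries, joins them with hyphens and lowercases once at the end, instead of A's inline character-by-character building of the lowered result.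
import Mathlib
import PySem

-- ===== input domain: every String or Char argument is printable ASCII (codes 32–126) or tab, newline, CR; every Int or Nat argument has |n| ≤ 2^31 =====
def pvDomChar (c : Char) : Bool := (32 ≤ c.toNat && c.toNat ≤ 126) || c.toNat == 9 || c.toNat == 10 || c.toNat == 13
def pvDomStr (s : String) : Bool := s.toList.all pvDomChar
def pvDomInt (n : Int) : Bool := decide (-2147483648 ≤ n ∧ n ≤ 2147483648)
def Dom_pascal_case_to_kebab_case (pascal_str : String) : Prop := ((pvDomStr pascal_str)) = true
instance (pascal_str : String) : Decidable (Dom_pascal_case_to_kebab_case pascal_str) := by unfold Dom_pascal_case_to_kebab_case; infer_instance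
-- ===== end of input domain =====

-- B builds word segments at uppercase boundaries and joins/lowers once; A builds the lowered result inline (alternative decomposition, same cost).

-- ===== PORT A =====
-- result = first char lowered; then for each char: '-' + lowered char if uppercase, else char
def pascal_case_to_kebab_case (pascal_str : String) : String :=
  match pascal_str.toList with
  | [] => pascal_str                 -- 'if not pascal_str: return pascal_str'
  | c :: rest =>
    String.ofList (rest.foldl
      (fun acc ch =>
        if PySem.Chars.isupper ch then acc ++ ['-', PySem.Chars.lowerChar ch]
        else acc ++ [ch])
      [PySem.Chars.lowerChar c])

-- ===== PORT B =====
-- words/current accumulation, then hyphen-join and lower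
def pascal_case_to_kebab_case_alt (pascal_str : String) : String :=
  match pascal_str.toList with
  | [] => pascal_str                 -- 'if not pascal_str: return pascal_str'
  | c :: rest =>
    let st := rest.foldl
      (fun (st : List (List Char) × List Char) ch =>
        if PySem.Chars.isupper ch then (st.1 ++ [st.2], [ch])
        else (st.1, st.2 ++ [ch]))
      ([], [c])
    String.ofList (PySem.Chars.lower (PySem.Chars.join ['-'] (st.1 ++ [st.2])))

-- ===== PRECONDITION & SPEC =====
def Spec_pascal_case_to_kebab_case (pascal_str : String) (out : String) : Prop := out = pascal_case_to_kebab_case_alt pascal_str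
instance (pascal_str : String) (out : String) : Decidable (Spec_pascal_case_to_kebab_case pascal_str out) := by unfold Spec_pascal_case_to_kebab_case; infer_instance

-- ===== CLAIM (what is proved, stated in full; the proofs are below) =====
def Claim_equal_pascal_case_to_kebab_case : Prop := ∀ (pascal_str : String), Dom_pascal_case_to_kebab_case pascal_str → Spec_pascal_case_to_kebab_case pascal_str (pascal_case_to_kebab_case pascal_str)

-- ===== LEMMAS AND PROOFS =====

-- '-'-join over a snoc of a nonempty list
theorem pv_join_snoc (sep y : List Char) :
    ∀ (l : List Char) (t : List (List Char)),
      PySem.Chars.join sep ((l :: t) ++ [y]) = PySem.Chars.join sep (l :: t) ++ sep ++ y := by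
  intro l t
  induction t generalizing l with
  | nil => simp [PySem.Chars.join, List.intercalate]
  | cons m t ih =>
    have h1 : PySem.Chars.join sep (l :: m :: (t ++ [y])) =
        l ++ sep ++ PySem.Chars.join sep (m :: (t ++ [y])) := by
      simp [PySem.Chars.join, List.intercalate]
    have h2 : PySem.Chars.join sep (l :: m :: t) =
        l ++ sep ++ PySem.Chars.join sep (m :: t) := by
      simp [PySem.Chars.join, List.intercalate]
    calc PySem.Chars.join sep ((l :: m :: t) ++ [y])
        = l ++ sep ++ PySem.Chars.join sep ((m :: t) ++ [y]) := h1
      _ = l ++ sep ++ (PySem.Chars.join sep (m :: t) ++ sep ++ y) := by rw [ih]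
      _ = PySem.Chars.join sep (l :: m :: t) ++ sep ++ y := by rw [h2]; simp

-- extending the last segment extends the join
theorem pv_join_last_append (sep e : List Char) :
    ∀ (ws : List (List Char)) (cur : List Char),
      PySem.Chars.join sep (ws ++ [cur ++ e]) = PySem.Chars.join sep (ws ++ [cur]) ++ e := by
  intro ws
  induction ws with
  | nil => intro cur; simp [PySem.Chars.join, List.intercalate]
  | cons w t ih =>
    intro cur
    cases t with
    | nil => simp [PySem.Chars.join, List.intercalate]
    | cons m r =>
      have h1 := pv_join_snoc sep (cur ++ e) w (m :: r)
      have h2 := pv_join_snoc sep cur w (m :: r)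
      simp only [List.cons_append] at *
      rw [h1, h2]; simp

theorem pv_lowerChar_of_not_upper (ch : Char) (h : PySem.Chars.isupper ch = false) :
    PySem.Chars.lowerChar ch = ch := by
  simp [PySem.Chars.lowerChar, h]

-- loop invariant: A's running string is the lowered join of B's running segments
theorem pv_main (rest : List Char) :
    ∀ (ws : List (List Char)) (cur : List Char),
      rest.foldl
        (fun acc ch =>
          if PySem.Chars.isupper ch then acc ++ ['-', PySem.Chars.lowerChar ch]
          else acc ++ [ch])
        (PySem.Chars.lower (PySem.Chars.join ['-'] (ws ++ [cur]))) =
      (fun (st : List (List Char) × List Char) =>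
          PySem.Chars.lower (PySem.Chars.join ['-'] (st.1 ++ [st.2])))
        (rest.foldl
          (fun (st : List (List Char) × List Char) ch =>
            if PySem.Chars.isupper ch then (st.1 ++ [st.2], [ch])
            else (st.1, st.2 ++ [ch]))
          (ws, cur)) := by
  induction rest with
  | nil => intro ws cur; rfl
  | cons ch rest ih =>
    intro ws cur
    by_cases h : PySem.Chars.isupper ch = true
    · simp only [List.foldl_cons, h, if_pos]
      have hsnoc : PySem.Chars.join ['-'] ((ws ++ [cur]) ++ [[ch]]) =
          PySem.Chars.join ['-'] (ws ++ [cur]) ++ ['-'] ++ [ch] := by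
        cases ws with
        | nil => exact pv_join_snoc ['-'] [ch] cur []
        | cons w t =>
          simpa using pv_join_snoc ['-'] [ch] w (t ++ [cur])
      have hlow : PySem.Chars.lower (PySem.Chars.join ['-'] (ws ++ [cur])) ++
            ['-', PySem.Chars.lowerChar ch] =
          PySem.Chars.lower (PySem.Chars.join ['-'] ((ws ++ [cur]) ++ [[ch]])) := by
        rw [hsnoc]
        simp [PySem.Chars.lower]
        decide
      rw [hlow]
      simpa using ih (ws ++ [cur]) [ch]
    · have h' : PySem.Chars.isupper ch = false := by simpa using h
      simp only [List.foldl_cons, h', Bool.false_eq_true, if_false]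
      have hlow : PySem.Chars.lower (PySem.Chars.join ['-'] (ws ++ [cur])) ++ [ch] =
          PySem.Chars.lower (PySem.Chars.join ['-'] (ws ++ [cur ++ [ch]])) := by
        rw [pv_join_last_append ['-'] [ch] ws cur]
        simp [PySem.Chars.lower, pv_lowerChar_of_not_upper ch h']
      rw [hlow]
      exact ih ws (cur ++ [ch])

-- ===== VERDICT (by name: the statement is the Claim_ definition above) =====
theorem pascal_case_to_kebab_case_spec : Claim_equal_pascal_case_to_kebab_case := by
  intro s _
  unfold Spec_pascal_case_to_kebab_case pascal_case_to_kebab_case pascal_case_to_kebab_case_alt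
  cases h : s.toList with
  | nil => rfl
  | cons c rest =>
    have hbase : PySem.Chars.lower (PySem.Chars.join ['-'] (([] : List (List Char)) ++ [[c]])) =
        [PySem.Chars.lowerChar c] := by
      simp [PySem.Chars.join, List.intercalate, PySem.Chars.lower]
    have := pv_main rest [] [c]
    rw [hbase] at this
    simp only []
    rw [this]
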